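-- pv_equiv track=rewrite | github.com/Sokwva/NetDevRExecEngine | utils/macAddrUtils.py | fourPartToEight
-- ===== SOURCE A (Python) =====
-- def fourPartToEight(split: str, raw: str):
--     x = raw.replace(split, "")
--     y = []
--     e = 0
--     for t in x:
--         if e % 2 == 0 and e != 0:
--             y.append(":")
--         y.append(t)
--         e += 1
--     return "".join(y)
-- ===== SOURCE B (Python) =====
-- def fourPartToEight(split: str, raw: str):
--     x = raw.replace(split, "")
--     return ":".join(x[i:i+2] for i in range(0, len(x), 2))
-- ===== Notes on version B (the rewrite author's own statement) =====
-- stated objective: idiomatic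
-- what changed: Replaces the per-character loop with a modulo counter and list-append by slicing the stripped string into 2-character chunks and letting str.join insert the separators.
import Mathlib
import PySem

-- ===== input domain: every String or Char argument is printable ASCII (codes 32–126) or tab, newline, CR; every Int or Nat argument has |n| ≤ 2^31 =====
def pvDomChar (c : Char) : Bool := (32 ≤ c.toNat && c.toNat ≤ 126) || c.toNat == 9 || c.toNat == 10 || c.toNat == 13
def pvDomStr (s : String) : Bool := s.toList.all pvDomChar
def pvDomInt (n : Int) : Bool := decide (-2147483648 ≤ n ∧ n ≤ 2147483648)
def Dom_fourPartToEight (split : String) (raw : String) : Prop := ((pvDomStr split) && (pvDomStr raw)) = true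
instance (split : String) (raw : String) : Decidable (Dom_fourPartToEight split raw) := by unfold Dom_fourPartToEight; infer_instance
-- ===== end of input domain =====

-- B reformats by slicing into 2-char chunks joined with ':' instead of A's per-character
-- loop with a modulo counter; same result, more idiomatic decomposition.

-- ===== PORT A =====
-- one loop iteration of A: append ":" before chars at even nonzero positions, then the char
def stepA (st : List String × Nat) (t : Char) : List String × Nat :=
  ((if st.2 % 2 == 0 && st.2 != 0 then st.1 ++ [":"] else st.1) ++ [String.ofList [t]], st.2 + 1)

def fourPartToEight (split : String) (raw : String) : String :=
  let x := PySem.Str.replace raw split ""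
  let st := x.toList.foldl stepA ([], 0)
  PySem.Str.join "" st.1

-- ===== PORT B =====
def fourPartToEight_alt (split : String) (raw : String) : String :=
  let x := PySem.Str.replace raw split ""
  PySem.Str.join ":" ((PySem.List.pyRange 0 (PySem.Str.len x) 2).map
    (fun i => String.ofList (PySem.Chars.slice x.toList (some i) (some (i + 2)))))

-- ===== PRECONDITION & SPEC =====
def Spec_fourPartToEight (split : String) (raw : String) (out : String) : Prop := out = fourPartToEight_alt split raw
instance (split : String) (raw : String) (out : String) : Decidable (Spec_fourPartToEight split raw out) := by unfold Spec_fourPartToEight; infer_instance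

-- ===== CLAIM (what is proved, stated in full; the proofs are below) =====
def Claim_equal_fourPartToEight : Prop := ∀ (split : String) (raw : String), Dom_fourPartToEight split raw → Spec_fourPartToEight split raw (fourPartToEight split raw)

-- ===== LEMMAS AND PROOFS =====

-- the colon-interleaved character sequence both programs produce
def specA : List Char → List Char
  | [] => []
  | [a] => [a]
  | [a, b] => [a, b]
  | a :: b :: c :: r => a :: b :: ':' :: specA (c :: r)

-- A's loop: the accumulator is a pure prefix
theorem foldl_stepA_prefix (cs : List Char) (y : List String) (e : Nat) :
    (cs.foldl stepA (y, e)).1 = y ++ (cs.foldl stepA ([], e)).1 := by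
  induction cs generalizing y e with
  | nil => simp
  | cons t r ih =>
    simp only [List.foldl_cons, stepA]
    rw [ih ((if e % 2 == 0 && e != 0 then y ++ [":"] else y) ++ [String.ofList [t]]) (e + 1),
        ih ((if e % 2 == 0 && e != 0 then ([] : List String) ++ [":"] else []) ++ [String.ofList [t]]) (e + 1)]
    split_ifs <;> simp

-- the counter only matters through its parity and zeroness
theorem foldl_stepA_shift (cs : List Char) (e e' : Nat)
    (hp : e % 2 = e' % 2) (hz : e = 0 ↔ e' = 0) :
    (cs.foldl stepA ([], e)).1 = (cs.foldl stepA ([], e')).1 := by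
  induction cs generalizing e e' with
  | nil => rfl
  | cons t r ih =>
    have hc : ((e % 2 == 0 && e != 0) : Bool) = ((e' % 2 == 0 && e' != 0) : Bool) := by
      rcases Nat.eq_zero_or_pos e with h0 | h0
      · have h0' := hz.mp h0
        subst h0
        simp [h0']
      · have he : e ≠ 0 := by omega
        have he' : e' ≠ 0 := fun h => he (hz.mpr h)
        have hb : (e != 0) = true := by simp [he]
        have hb' : (e' != 0) = true := by simp [he']
        rw [hp, hb, hb']
    simp only [List.foldl_cons, stepA]
    rw [foldl_stepA_prefix r _ (e + 1), foldl_stepA_prefix r _ (e' + 1),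
        ih (e + 1) (e' + 1) (by omega) (by omega), hc]

-- restarting at counter 2 just prepends one ":"
theorem foldl_stepA_two (c : Char) (r : List Char) :
    ((c :: r).foldl stepA ([], 2)).1 = ":" :: ((c :: r).foldl stepA ([], 0)).1 := by
  show (r.foldl stepA ([":", String.ofList [c]], 3)).1
     = ":" :: (r.foldl stepA ([String.ofList [c]], 1)).1
  rw [foldl_stepA_prefix r _ 3, foldl_stepA_prefix r _ 1,
      foldl_stepA_shift r 3 1 (by omega) (by omega)]
  simp

-- A's loop builds exactly the singleton strings of specA
theorem foldl_stepA_spec (cs : List Char) :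
    (cs.foldl stepA ([], 0)).1 = (specA cs).map (fun c => String.ofList [c]) := by
  induction cs using specA.induct with
  | case1 => rfl
  | case2 a => rfl
  | case3 a b => rfl
  | case4 a b c r ih =>
    show (List.foldl stepA ([String.ofList [a], String.ofList [b]], 2) (c :: r)).1 = _
    rw [foldl_stepA_prefix, foldl_stepA_two, ih]
    simp [specA]

-- join over a cons with a nonempty tail
theorem join_cons_of_ne (sep p : List Char) (l : List (List Char)) (h : l ≠ []) :
    PySem.Chars.join sep (p :: l) = p ++ sep ++ PySem.Chars.join sep l := by
  cases l with
  | nil => exact absurd rfl h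
  | cons q rest => exact PySem.Chars.join_cons_cons sep p q rest

-- B's chunk list in Nat form
theorem chunks_join_spec (cs : List Char) :
    PySem.Chars.join [':']
      ((List.range ((cs.length + 1) / 2)).map (fun k => (cs.drop (2 * k)).take 2)) = specA cs := by
  induction cs using specA.induct with
  | case1 => rfl
  | case2 a => simp [specA, List.range_succ, PySem.Chars.join_singleton]
  | case3 a b => simp [specA, List.range_succ, PySem.Chars.join_singleton]
  | case4 a b c r ih =>
    have hlen : ((a :: b :: c :: r).length + 1) / 2 = ((c :: r).length + 1) / 2 + 1 := by
      simp only [List.length_cons]; omega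
    rw [hlen, List.range_succ_eq_map, List.map_cons, List.map_map]
    have hmap : (List.range (((c :: r).length + 1) / 2)).map
          ((fun k => ((a :: b :: c :: r).drop (2 * k)).take 2) ∘ Nat.succ)
        = (List.range (((c :: r).length + 1) / 2)).map (fun k => ((c :: r).drop (2 * k)).take 2) := by
      apply List.map_congr_left
      intro k _
      show (((a :: b :: c :: r)).drop (2 * (k + 1))).take 2 = ((c :: r).drop (2 * k)).take 2
      have h2 : 2 * (k + 1) = 2 * k + 1 + 1 := by omega
      rw [h2, List.drop_succ_cons, List.drop_succ_cons]
    rw [hmap]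
    have hnonempty : (List.range (((c :: r).length + 1) / 2)).map
        (fun k => ((c :: r).drop (2 * k)).take 2) ≠ [] := by
      simp only [ne_eq, List.map_eq_nil_iff, List.range_eq_nil, List.length_cons]
      omega
    rw [join_cons_of_ne _ _ _ hnonempty, ih]
    simp [specA]

-- bridge: B's pyRange/slice chunking equals the Nat form
theorem pyRange_slice_chunks (cs : List Char) :
    (PySem.List.pyRange 0 (cs.length : Int) 2).map
        (fun i => PySem.Chars.slice cs (some i) (some (i + 2)))
      = (List.range ((cs.length + 1) / 2)).map (fun k => (cs.drop (2 * k)).take 2) := by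
  rw [PySem.List.pyRange_of_pos 0 (cs.length : Int) (by norm_num)]
  rcases Nat.eq_zero_or_pos cs.length with h0 | h0
  · simp [h0]
  · have hlt : (0 : Int) < (cs.length : Int) := by exact_mod_cast h0
    rw [if_pos hlt]
    have hcnt : (((cs.length : Int) - 0 + 2 - 1) / 2).toNat = (cs.length + 1) / 2 := by
      have := Int.natCast_div (cs.length + 1) 2
      omega
    rw [hcnt, List.map_map]
    apply List.map_congr_left
    intro k _
    show PySem.Chars.slice cs (some (0 + 2 * (k : Int))) (some (0 + 2 * (k : Int) + 2))
       = (cs.drop (2 * k)).take 2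
    have h1 : (0 : Int) + 2 * (k : Int) = ((2 * k : Nat) : Int) := by push_cast; ring
    rw [PySem.Chars.slice_eq_listSlice, h1,
        show ((2 : Int)) = ((2 : Nat) : Int) from rfl]
    exact PySem.List.slice_natCast_add cs (2 * k) 2

-- ===== VERDICT (by name: the statement is the Claim_ definition above) =====
theorem fourPartToEight_spec : Claim_equal_fourPartToEight := by
  intro split raw _
  unfold Spec_fourPartToEight fourPartToEight fourPartToEight_alt
  rw [← String.toList_inj]
  simp only [PySem.Str.toList_join, List.map_map]
  rw [show ("".toList) = ([] : List Char) from rfl,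
      show (":".toList) = [':'] from rfl,
      foldl_stepA_spec, List.map_map]
  have hg1 : (String.toList ∘ fun c : Char => String.ofList [c]) = fun c : Char => [c] := by
    funext c; simp
  have hg2 : (String.toList ∘ fun i : Int =>
        String.ofList (PySem.Chars.slice (PySem.Str.replace raw split "").toList
          (some i) (some (i + 2))))
      = fun i : Int => PySem.Chars.slice (PySem.Str.replace raw split "").toList
          (some i) (some (i + 2)) := by
    funext i; simp
  rw [hg1, hg2, PySem.Chars.join_nil_singletons, PySem.Str.len_eq,
      pyRange_slice_chunks, chunks_join_spec]
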